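-- pv_equiv track=rewrite | github.com/14Subiga/Startoon_Assignment | Ans1/find_peaks.py | find_peaks_and_minima
-- ===== SOURCE A (Python) =====
-- def find_peaks_and_minima(signal):
--     peaks = []
--     minima = []
--     for i in range(1, len(signal) - 1):
--         if signal[i] > signal[i - 1] and signal[i] > signal[i + 1]:
--             peaks.append(i)
--         elif signal[i] < signal[i - 1] and signal[i] < signal[i + 1]:
--             minima.append(i)
--     return peaks, minima
-- ===== SOURCE B (Python) =====
-- def find_peaks_and_minima(sig):
--     diffs = [sig[k + 1] - sig[k] for k in range(len(sig) - 1)]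
--     peaks = []
--     minima = []
--     for j in range(1, len(diffs)):
--         if diffs[j - 1] > 0 and diffs[j] < 0:
--             peaks.append(j)
--         elif diffs[j - 1] < 0 and diffs[j] > 0:
--             minima.append(j)
--     return peaks, minima
-- ===== Notes on version B (the rewrite author's own statement) =====
-- stated objective: alternative
-- what changed: B first builds a difference list diffs[k]=signal[k+1]-signal[k] and then classifies each interior index by the signs of two adjacent diffs, instead of re-comparing three raw neighbours per iteration.
import Mathlib
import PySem

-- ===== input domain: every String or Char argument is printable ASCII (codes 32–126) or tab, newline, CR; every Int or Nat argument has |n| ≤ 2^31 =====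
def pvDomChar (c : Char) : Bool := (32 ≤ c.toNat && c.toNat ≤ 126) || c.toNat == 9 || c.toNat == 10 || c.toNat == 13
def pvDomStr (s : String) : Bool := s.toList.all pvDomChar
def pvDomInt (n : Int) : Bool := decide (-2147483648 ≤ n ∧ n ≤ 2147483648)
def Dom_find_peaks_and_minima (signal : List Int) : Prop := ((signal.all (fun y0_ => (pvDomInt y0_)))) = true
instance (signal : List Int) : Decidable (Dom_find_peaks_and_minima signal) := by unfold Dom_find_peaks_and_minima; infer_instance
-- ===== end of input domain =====

-- B builds a difference list first and classifies interior indices by signs of adjacent diffs (alternative decomposition, same cost).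


-- ===== PORT A =====
def find_peaks_and_minima (signal : List Int) : List Int × List Int :=
  (PySem.List.pyRange 1 ((signal.length : Int) - 1) 1).foldl
    (fun (st : List Int × List Int) i =>
      if PySem.List.pyGetD signal i 0 > PySem.List.pyGetD signal (i - 1) 0 ∧
         PySem.List.pyGetD signal i 0 > PySem.List.pyGetD signal (i + 1) 0 then
        (st.1 ++ [i], st.2)
      else if PySem.List.pyGetD signal i 0 < PySem.List.pyGetD signal (i - 1) 0 ∧
              PySem.List.pyGetD signal i 0 < PySem.List.pyGetD signal (i + 1) 0 then
        (st.1, st.2 ++ [i])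
      else st) ([], [])

-- ===== PORT B =====
def find_peaks_and_minima_alt (signal : List Int) : List Int × List Int :=
  let diffs := (PySem.List.pyRange 0 ((signal.length : Int) - 1) 1).map
    (fun k => PySem.List.pyGetD signal (k + 1) 0 - PySem.List.pyGetD signal k 0)
  (PySem.List.pyRange 1 (diffs.length : Int) 1).foldl
    (fun (st : List Int × List Int) j =>
      if PySem.List.pyGetD diffs (j - 1) 0 > 0 ∧ PySem.List.pyGetD diffs j 0 < 0 then
        (st.1 ++ [j], st.2)
      else if PySem.List.pyGetD diffs (j - 1) 0 < 0 ∧ PySem.List.pyGetD diffs j 0 > 0 then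
        (st.1, st.2 ++ [j])
      else st) ([], [])

-- ===== PRECONDITION & SPEC =====
def Spec_find_peaks_and_minima (signal : List Int) (out : List Int × List Int) : Prop := out = find_peaks_and_minima_alt signal
instance (signal : List Int) (out : List Int × List Int) : Decidable (Spec_find_peaks_and_minima signal out) := by unfold Spec_find_peaks_and_minima; infer_instance

-- ===== CLAIM (what is proved, stated in full; the proofs are below) =====
def Claim_equal_find_peaks_and_minima : Prop := ∀ (signal : List Int), Dom_find_peaks_and_minima signal → Spec_find_peaks_and_minima signal (find_peaks_and_minima signal)

-- ===== LEMMAS AND PROOFS =====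

theorem find_peaks_and_minima_eq (signal : List Int) :
    find_peaks_and_minima signal = find_peaks_and_minima_alt signal := by
  unfold find_peaks_and_minima find_peaks_and_minima_alt
  simp only [PySem.List.length_pyRange_one, List.length_map]
  have hlen : ((((signal.length : Int) - 1 - 0).toNat : Int)) = (signal.length : Int) - 1 ∨
      (signal.length : Int) - 1 ≤ 0 := by omega
  rcases hlen with h | h
  · rw [h]
    refine PySem.List.foldl_congr_mem _ _ _ _ ?_
    intro st j hj
    rw [PySem.List.mem_pyRange_one] at hj
    have h1 : PySem.List.pyGetD ((PySem.List.pyRange 0 ((signal.length : Int) - 1) 1).map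
        (fun k => PySem.List.pyGetD signal (k + 1) 0 - PySem.List.pyGetD signal k 0)) (j - 1) 0
        = PySem.List.pyGetD signal j 0 - PySem.List.pyGetD signal (j - 1) 0 := by
      rw [PySem.List.pyGetD_map_pyRange_of_nonneg _ _ _ _ (by omega) (by omega)]
      ring_nf
    have h2 : PySem.List.pyGetD ((PySem.List.pyRange 0 ((signal.length : Int) - 1) 1).map
        (fun k => PySem.List.pyGetD signal (k + 1) 0 - PySem.List.pyGetD signal k 0)) j 0
        = PySem.List.pyGetD signal (j + 1) 0 - PySem.List.pyGetD signal j 0 := by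
      rw [PySem.List.pyGetD_map_pyRange_of_nonneg _ _ _ _ (by omega) (by omega)]
    rw [h1, h2]
    have e1 : (PySem.List.pyGetD signal j 0 - PySem.List.pyGetD signal (j - 1) 0 > 0 ∧
        PySem.List.pyGetD signal (j + 1) 0 - PySem.List.pyGetD signal j 0 < 0) ↔
        (PySem.List.pyGetD signal j 0 > PySem.List.pyGetD signal (j - 1) 0 ∧
        PySem.List.pyGetD signal j 0 > PySem.List.pyGetD signal (j + 1) 0) := by omega
    have e2 : (PySem.List.pyGetD signal j 0 - PySem.List.pyGetD signal (j - 1) 0 < 0 ∧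
        PySem.List.pyGetD signal (j + 1) 0 - PySem.List.pyGetD signal j 0 > 0) ↔
        (PySem.List.pyGetD signal j 0 < PySem.List.pyGetD signal (j - 1) 0 ∧
        PySem.List.pyGetD signal j 0 < PySem.List.pyGetD signal (j + 1) 0) := by omega
    rw [if_congr e1 rfl rfl, if_congr e2 rfl rfl]
  · have h0 : ((signal.length : Int) - 1 - 0).toNat = 0 := by omega
    rw [h0,
      show PySem.List.pyRange 1 ((signal.length : Int) - 1) 1 = [] from PySem.List.pyRange_one_eq_nil (by omega),
      show PySem.List.pyRange 1 ((0:Nat) : Int) 1 = [] from PySem.List.pyRange_one_eq_nil (by omega)]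
    rfl

-- ===== VERDICT (by name: the statement is the Claim_ definition above) =====
theorem find_peaks_and_minima_spec : Claim_equal_find_peaks_and_minima := by
  intro signal _
  unfold Spec_find_peaks_and_minima
  exact find_peaks_and_minima_eq signal
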